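-- pv_equiv track=rewrite | github.com/Satwant201/MS_ADS_Assignments | DSCI553/SON_Algorithm/SON_Algo.py | SON_Map2_Task
-- ===== SOURCE A (Python) =====
-- def format_dictionary_2_list(result_dict):
--     lst = set()   ### initialze is list
--     for k11,v11 in result_dict.items(): ## iterate though output dictionary items
--         lst.add((k11,v11))  ### make tuple of key and value and store in list
--     return list(lst)
--
-- def SON_Map2_Task(dataset, candidates):
--     '''
--     @Input : Dataset
--     Candiates : Frequent itemset found in phase 1 of SON using subsets of data
--
--     @Return Type:
--     Reutn list of tuples with key, value depicting frequncy of each candiate in given partition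
--     '''
--     result_dict = {}
--
--     for li in dataset:
--         for item in candidates:
--             delta = set(item)
--
--             if delta.issubset(li):
--                 cnt = result_dict.get(item,0)
--                 result_dict[item]=cnt+1
--     result_li = format_dictionary_2_list(result_dict)
--     return result_li
-- ===== SOURCE B (Python) =====
-- def SON_Map2_Task(dataset, candidates):
--     # Inverted index: element value -> set of transaction indices containing it.
--     # Count for a candidate = |intersection of its elements' posting sets|,
--     # scaled by the candidate's multiplicity in `candidates`.
--     # Returned in sorted order (the original returns list(set(...)), whose
--     # order is unspecified; callers compare the result as a set).
--     n = len(dataset)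
--     index = {}
--     for i, row in enumerate(dataset):
--         for x in row:
--             index.setdefault(x, set()).add(i)
--     mult = {}
--     for item in candidates:
--         mult[item] = mult.get(item, 0) + 1
--     full = set(range(n))
--     result = []
--     for item, m in mult.items():
--         posting = full
--         for x in item:
--             posting = posting & index.get(x, set())
--         cnt = len(posting)
--         if cnt:
--             result.append((item, cnt * m))
--     return sorted(result)
-- ===== Notes on version B (the rewrite author's own statement) =====
-- stated objective: faster
-- what changed: Replaces the transaction-by-candidate subset-test loop that mutates a count dict with an inverted index (element -> set of transaction indices), counting each distinct candidate once as the size of the intersection of its elements' posting sets, scaled by the candidate's multiplicity.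
import Mathlib
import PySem

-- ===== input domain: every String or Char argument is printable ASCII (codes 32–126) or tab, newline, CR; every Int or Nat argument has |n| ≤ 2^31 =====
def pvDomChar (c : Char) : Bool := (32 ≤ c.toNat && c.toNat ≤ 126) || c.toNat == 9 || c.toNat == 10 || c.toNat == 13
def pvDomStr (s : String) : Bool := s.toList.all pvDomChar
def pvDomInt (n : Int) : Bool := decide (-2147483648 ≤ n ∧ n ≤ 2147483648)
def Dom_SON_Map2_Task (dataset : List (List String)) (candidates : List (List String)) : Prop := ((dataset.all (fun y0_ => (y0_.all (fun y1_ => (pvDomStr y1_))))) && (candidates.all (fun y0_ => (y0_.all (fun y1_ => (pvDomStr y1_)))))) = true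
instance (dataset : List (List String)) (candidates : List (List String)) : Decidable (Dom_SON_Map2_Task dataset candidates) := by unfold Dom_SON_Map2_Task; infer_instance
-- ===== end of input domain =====

-- B replaces A's transaction×candidate subset testing with an inverted index (element → posting set
-- of transaction indices) plus a candidate-multiplicity dict; equivalence of RETURN values only.
-- Python's list(set(...)) iteration order is hash-arbitrary and not modelled (outputs are compared
-- as sets); both ports emit the pairs sorted by key, one valid realisation of that unspecified order.

-- ===== PORT A =====
-- list(set(result_dict.items())): unspecified hash order; emitted sorted by key (keys are distinct)
def pvFormatDict2List (result_dict : PySem.Dict (List String) Int) : List (List String × Int) :=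
  PySem.List.sorted (PySem.Set.ofList result_dict.items) (fun p => p.1) false

def SON_Map2_Task (dataset : List (List String)) (candidates : List (List String)) : List (List String × Int) :=
  let result_dict : PySem.Dict (List String) Int :=
    dataset.foldl (fun d li =>
      candidates.foldl (fun d item =>
        let delta := PySem.Set.ofList item
        if PySem.Set.issubset delta li then
          let cnt := d.getD item 0
          d.insert item (cnt + 1)
        else d) d)
      PySem.Dict.empty
  pvFormatDict2List result_dict

-- ===== PORT B =====
-- index.setdefault(x, set()).add(i)  (in-place add modelled by re-inserting the grown set)
def pvIndex (dataset : List (List String)) : PySem.Dict String (PySem.Set Int) :=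
  (PySem.List.enumerate dataset 0).foldl (fun idx p =>
    p.2.foldl (fun idx x => idx.insert x (PySem.Set.add (idx.getD x PySem.Set.empty) p.1)) idx)
    PySem.Dict.empty

def SON_Map2_Task_alt (dataset : List (List String)) (candidates : List (List String)) : List (List String × Int) :=
  let n : Int := dataset.length
  let index := pvIndex dataset
  let mult : PySem.Dict (List String) Int :=
    candidates.foldl (fun d item => d.insert item (d.getD item 0 + 1)) PySem.Dict.empty
  let full : PySem.Set Int := PySem.Set.ofList (PySem.List.pyRange 0 n 1)
  let result : List (List String × Int) :=
    mult.items.foldl (fun r p =>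
      let posting := p.1.foldl (fun s x => PySem.Set.inter s (index.getD x PySem.Set.empty)) full
      let cnt : Int := PySem.Set.len posting
      if cnt ≠ 0 then r ++ [(p.1, cnt * p.2)] else r) []
  PySem.List.sorted result (fun p => p.1) false

-- ===== PRECONDITION & SPEC =====
def Spec_SON_Map2_Task (dataset : List (List String)) (candidates : List (List String)) (out : List (List String × Int)) : Prop := out = SON_Map2_Task_alt dataset candidates
instance (dataset : List (List String)) (candidates : List (List String)) (out : List (List String × Int)) : Decidable (Spec_SON_Map2_Task dataset candidates out) := by unfold Spec_SON_Map2_Task; infer_instance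

-- ===== CLAIM (what is proved, stated in full; the proofs are below) =====
def Claim_equal_SON_Map2_Task : Prop := ∀ (dataset : List (List String)) (candidates : List (List String)), Dom_SON_Map2_Task dataset candidates → Spec_SON_Map2_Task dataset candidates (SON_Map2_Task dataset candidates)


-- ===== LEMMAS AND PROOFS =====

-- Bool subset test and match count used by both characterisations
def pvSubB (c li : List String) : Bool := c.all (fun x => decide (x ∈ li))
def pvMatch (ds : List (List String)) (c : List String) : Nat := ds.countP (pvSubB c)

def pvStepA (li : List String) (d : PySem.Dict (List String) Int) (item : List String) : PySem.Dict (List String) Int :=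
  if PySem.Set.issubset (PySem.Set.ofList item) li then d.insert item (d.getD item 0 + 1) else d

def pvDictA (ds cs : List (List String)) : PySem.Dict (List String) Int :=
  ds.foldl (fun d li => cs.foldl (pvStepA li) d) PySem.Dict.empty

lemma pvA_eq (ds cs : List (List String)) : SON_Map2_Task ds cs = pvFormatDict2List (pvDictA ds cs) := rfl

lemma pvCondA (item li : List String) : PySem.Set.issubset (PySem.Set.ofList item) li = pvSubB item li := by
  rw [Bool.eq_iff_iff]
  simp [PySem.Set.issubset_iff, PySem.Set.mem_ofList, pvSubB, List.all_eq_true]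

lemma pvGet?_eq {κ ν : Type} [BEq κ] (d : PySem.Dict κ ν) (k : κ) (v0 : ν) :
    d.get? k = if d.contains k then some (d.getD k v0) else none := by
  rw [PySem.Dict.contains_eq_isSome_get?]
  cases h : d.get? k <;> simp [PySem.Dict.getD_eq_get?_getD, h]

lemma pvInner_getD (li : List String) (cs : List (List String)) (c : List String) :
    ∀ d : PySem.Dict (List String) Int,
    (cs.foldl (pvStepA li) d).getD c 0 =
      d.getD c 0 + (if pvSubB c li then (cs.count c : Int) else 0) := by
  induction cs with
  | nil => intro d; simp
  | cons x t ih =>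
    intro d
    simp only [List.foldl_cons]
    rw [ih]
    unfold pvStepA
    rw [pvCondA]
    by_cases hx : pvSubB x li
    · rw [if_pos hx, PySem.Dict.getD_insert]
      rcases eq_or_ne c x with rfl | hne
      · simp only [if_pos rfl, if_pos hx, List.count_cons_self]
        push_cast; ring
      · simp [List.count_cons, hne, hne.symm]
    · rw [if_neg hx]
      rcases eq_or_ne c x with rfl | hne
      · simp [hx]
      · simp [List.count_cons, hne, hne.symm]

lemma pvInner_contains (li : List String) (cs : List (List String)) (c : List String) :
    ∀ d : PySem.Dict (List String) Int,
    (cs.foldl (pvStepA li) d).contains c =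
      (d.contains c || (pvSubB c li && decide (c ∈ cs))) := by
  induction cs with
  | nil => intro d; simp
  | cons x t ih =>
    intro d
    simp only [List.foldl_cons]
    rw [ih]
    unfold pvStepA
    rw [pvCondA]
    by_cases hx : pvSubB x li
    · rw [if_pos hx, PySem.Dict.contains_insert]
      rcases eq_or_ne c x with rfl | hne
      · simp [hx]
      · have hbe : (c == x) = false := by simp [hne]
        by_cases h2 : c ∈ t <;> simp [hbe, hne, h2]
    · rw [if_neg hx]
      rcases eq_or_ne c x with rfl | hne
      · simp [hx]
      · by_cases h2 : c ∈ t <;> simp [hne, h2]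

lemma pvOuter_getD (cs : List (List String)) (c : List String) (ds : List (List String)) :
    ∀ d : PySem.Dict (List String) Int,
    (ds.foldl (fun d li => cs.foldl (pvStepA li) d) d).getD c 0 =
      d.getD c 0 + (cs.count c : Int) * (pvMatch ds c : Int) := by
  induction ds with
  | nil => intro d; simp [pvMatch]
  | cons li ds ih =>
    intro d
    simp only [List.foldl_cons]
    rw [ih, pvInner_getD]
    have : pvMatch (li :: ds) c = pvMatch ds c + (if pvSubB c li then 1 else 0) := by
      simp [pvMatch, List.countP_cons]
    rw [this]
    by_cases h : pvSubB c li <;> simp [h] <;> push_cast <;> ring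

lemma pvOuter_contains (cs : List (List String)) (c : List String) (ds : List (List String)) :
    ∀ d : PySem.Dict (List String) Int,
    (ds.foldl (fun d li => cs.foldl (pvStepA li) d) d).contains c =
      (d.contains c || (decide (c ∈ cs) && ds.any (pvSubB c))) := by
  induction ds with
  | nil => intro d; simp
  | cons li ds ih =>
    intro d
    simp only [List.foldl_cons]
    rw [ih, pvInner_contains]
    by_cases h1 : pvSubB c li <;> by_cases h2 : c ∈ cs <;>
      simp [h1, h2, List.any_cons]

lemma pvInner_nodup (li : List String) (cs : List (List String)) :
    ∀ d : PySem.Dict (List String) Int, d.keys.Nodup → (cs.foldl (pvStepA li) d).keys.Nodup := by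
  induction cs with
  | nil => intro d h; simpa using h
  | cons x t ih =>
    intro d h
    simp only [List.foldl_cons]
    apply ih
    unfold pvStepA
    split
    · exact PySem.Dict.nodup_keys_insert _ _ _ h
    · exact h

lemma pvDictA_nodup (ds cs : List (List String)) : (pvDictA ds cs).keys.Nodup := by
  unfold pvDictA
  have : ∀ d : PySem.Dict (List String) Int, d.keys.Nodup →
      (ds.foldl (fun d li => cs.foldl (pvStepA li) d) d).keys.Nodup := by
    induction ds with
    | nil => intro d h; simpa using h
    | cons li ds ih =>
      intro d h
      simp only [List.foldl_cons]
      exact ih _ (pvInner_nodup li cs d h)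
  exact this _ PySem.Dict.nodup_keys_empty

lemma pvMatch_pos (ds : List (List String)) (c : List String) :
    0 < pvMatch ds c ↔ ds.any (pvSubB c) = true := by
  simp [pvMatch, List.countP_pos_iff, List.any_eq_true]

lemma pvA_mem (ds cs : List (List String)) (p : List String × Int) :
    p ∈ (pvDictA ds cs).items ↔
      (p.1 ∈ cs ∧ 0 < pvMatch ds p.1 ∧ p.2 = (cs.count p.1 : Int) * (pvMatch ds p.1 : Int)) := by
  obtain ⟨c, v⟩ := p
  rw [← PySem.Dict.get?_eq_some_iff_mem_items _ _ _ (pvDictA_nodup ds cs)]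
  unfold pvDictA
  rw [pvGet?_eq _ _ 0, pvOuter_contains, pvOuter_getD]
  simp only [PySem.Dict.contains_empty, PySem.Dict.getD_empty, Bool.false_or, zero_add]
  by_cases h1 : c ∈ cs
  · by_cases h2 : ds.any (pvSubB c) = true
    · rw [if_pos (by simp [h1, h2])]
      simp only [Option.some_inj]
      constructor
      · intro h; exact ⟨h1, (pvMatch_pos ds c).mpr h2, h.symm⟩
      · rintro ⟨-, -, hv⟩; exact hv.symm
    · rw [if_neg (by simp [h2])]
      refine iff_of_false (by simp) ?_
      rintro ⟨-, hpos, -⟩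
      exact absurd ((pvMatch_pos ds c).mp hpos) h2
  · rw [if_neg (by simp [h1])]
    exact iff_of_false (by simp) (fun h => h1 h.1)

-- ---- B side: the inverted index and posting intersections ----

lemma pvRow_getD (s : Int) (r : List String) :
    ∀ (d : PySem.Dict String (PySem.Set Int)) (x : String),
    (r.foldl (fun idx x => idx.insert x (PySem.Set.add (idx.getD x PySem.Set.empty) s)) d).getD x PySem.Set.empty
      = if x ∈ r then PySem.Set.add (d.getD x PySem.Set.empty) s else d.getD x PySem.Set.empty := by
  induction r with
  | nil => intro d x; simp
  | cons y t ih =>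
    intro d x
    simp only [List.foldl_cons]
    rw [ih, PySem.Dict.getD_insert]
    rcases eq_or_ne x y with rfl | hne
    · by_cases h2 : x ∈ t
      · rw [if_pos h2, if_pos rfl, if_pos (show x ∈ x :: t by simp)]
        exact PySem.Set.add_of_mem ((PySem.Set.mem_add _ _ _).mpr (Or.inr rfl))
      · rw [if_neg h2, if_pos rfl, if_pos (show x ∈ x :: t by simp)]
    · by_cases h2 : x ∈ t <;> simp [hne, h2]

lemma pvEnum_getD (xs : List (List String)) :
    ∀ (s : Int) (d : PySem.Dict String (PySem.Set Int)),
    (∀ y (i : Int), i ∈ d.getD y PySem.Set.empty → i < s) →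
    ∀ x, ((PySem.List.enumerate xs s).foldl (fun idx p =>
        p.2.foldl (fun idx x => idx.insert x (PySem.Set.add (idx.getD x PySem.Set.empty) p.1)) idx) d).getD x PySem.Set.empty
      = d.getD x PySem.Set.empty ++ (PySem.List.enumerate xs s).filterMap (fun p => if x ∈ p.2 then some p.1 else none) := by
  induction xs with
  | nil => intro s d h x; simp [PySem.List.enumerate_nil]
  | cons r xs ih =>
    intro s d h x
    rw [PySem.List.enumerate_cons]
    simp only [List.foldl_cons, List.filterMap_cons]
    have hg : ∀ y, (r.foldl (fun idx x => idx.insert x (PySem.Set.add (idx.getD x PySem.Set.empty) s)) d).getD y PySem.Set.empty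
        = if y ∈ r then PySem.Set.add (d.getD y PySem.Set.empty) s else d.getD y PySem.Set.empty :=
      fun y => pvRow_getD s r d y
    have h' : ∀ y (i : Int), i ∈ (r.foldl (fun idx x => idx.insert x (PySem.Set.add (idx.getD x PySem.Set.empty) s)) d).getD y PySem.Set.empty → i < s + 1 := by
      intro y i hi
      rw [hg y] at hi
      by_cases hy : y ∈ r
      · rw [if_pos hy] at hi
        rcases (PySem.Set.mem_add _ _ _).mp hi with hold | rfl
        · exact lt_trans (h y i hold) (by omega)
        · omega
      · rw [if_neg hy] at hi
        exact lt_trans (h y i hi) (by omega)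
    rw [ih (s + 1) _ h' x, hg x]
    by_cases hx : x ∈ r
    · rw [if_pos hx, if_pos hx,
        PySem.Set.add_of_not_mem (fun hmem => lt_irrefl s (h x s hmem))]
      simp [List.append_assoc]
    · rw [if_neg hx, if_neg hx]

lemma pvFilterMap_guard {q : Int → Prop} [DecidablePred q] (l : List Int) :
    l.filterMap (fun j => if q j then some j else none) = l.filter (fun j => decide (q j)) := by
  induction l with
  | nil => rfl
  | cons a l ih =>
    by_cases h : q a <;> simp [List.filterMap_cons, List.filter_cons, h, ih]

lemma pvIndex_getD (ds : List (List String)) (x : String) :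
    (pvIndex ds).getD x PySem.Set.empty
      = (PySem.List.pyRange 0 (ds.length : Int) 1).filter
          (fun j => decide (x ∈ PySem.List.pyGetD ds j ([] : List String))) := by
  unfold pvIndex
  rw [pvEnum_getD ds 0 PySem.Dict.empty (by simp) x]
  rw [PySem.List.enumerate_eq_map_pyRange ds ([] : List String), List.filterMap_map]
  simp only [PySem.Dict.getD_empty, PySem.List.len_eq]
  rw [show ((fun p : Int × List String => if x ∈ p.2 then some p.1 else none) ∘
      (fun j => (j, PySem.List.pyGetD ds j ([] : List String))))
      = fun j => if x ∈ PySem.List.pyGetD ds j ([] : List String) then some j else none from rfl]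
  rw [pvFilterMap_guard]
  rfl

lemma pvInter_eq_filter {s t : PySem.Set Int} :
    PySem.Set.inter s t = s.filter (fun a => t.contains a) := rfl

lemma pvPosting_eq (ds : List (List String)) (item : List String) :
    ∀ acc : List Int, (∀ j ∈ acc, j ∈ PySem.List.pyRange 0 (ds.length : Int) 1) →
    item.foldl (fun s x => PySem.Set.inter s ((pvIndex ds).getD x PySem.Set.empty)) acc
      = acc.filter (fun j => pvSubB item (PySem.List.pyGetD ds j ([] : List String))) := by
  induction item with
  | nil =>
    intro acc hacc
    simp [pvSubB]
  | cons x t ih =>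
    intro acc hacc
    simp only [List.foldl_cons]
    rw [pvInter_eq_filter, pvIndex_getD]
    have hstep : acc.filter (fun j => PySem.Set.contains ((PySem.List.pyRange 0 (ds.length : Int) 1).filter
          (fun j => decide (x ∈ PySem.List.pyGetD ds j ([] : List String)))) j)
        = acc.filter (fun j => decide (x ∈ PySem.List.pyGetD ds j ([] : List String))) := by
      apply List.filter_congr
      intro j hj
      simp [PySem.Set.contains_eq_listContains, List.mem_filter, hacc j hj]
    rw [hstep, ih _ (fun j hj => hacc j (List.mem_of_mem_filter hj))]
    rw [List.filter_filter]
    apply List.filter_congr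
    intro j hj
    simp [pvSubB, Bool.and_comm]

lemma pvSetLen_eq (s : PySem.Set Int) : PySem.Set.len s = (s.length : Int) := rfl

lemma pvCnt (ds : List (List String)) (item : List String) :
    PySem.Set.len (item.foldl (fun s x => PySem.Set.inter s ((pvIndex ds).getD x PySem.Set.empty))
        (PySem.Set.ofList (PySem.List.pyRange 0 (ds.length : Int) 1)))
      = (pvMatch ds item : Int) := by
  rw [PySem.Set.ofList_eq_self_of_nodup _ (PySem.List.nodup_pyRange_one _ _)]
  rw [pvPosting_eq ds item _ (fun j hj => hj), pvSetLen_eq]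
  rw [← List.countP_eq_length_filter]
  have : pvMatch ds item = ((PySem.List.pyRange 0 (ds.length : Int) 1).map
      (fun j => PySem.List.pyGetD ds j ([] : List String))).countP (pvSubB item) := by
    rw [PySem.List.map_pyGetD_pyRange_zero']
    rfl
  rw [pvMatch] at this ⊢
  rw [this, List.countP_map]
  rfl

-- ---- B side: the result list ----

lemma pvFoldlAppendIf {α β : Type} (q : α → Prop) [DecidablePred q] (f : α → β) (l : List α) :
    ∀ acc : List β, l.foldl (fun r x => if q x then r ++ [f x] else r) acc
      = acc ++ (l.filter (fun x => decide (q x))).map f := by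
  induction l with
  | nil => intro acc; simp
  | cons a l ih =>
    intro acc
    by_cases h : q a <;> simp [List.foldl_cons, List.filter_cons, h, ih]

def pvRB (ds cs : List (List String)) : List (List String × Int) :=
  (PySem.Dict.counter cs).items.foldl (fun r p =>
    if PySem.Set.len (p.1.foldl (fun s x => PySem.Set.inter s ((pvIndex ds).getD x PySem.Set.empty))
        (PySem.Set.ofList (PySem.List.pyRange 0 (ds.length : Int) 1))) ≠ 0
    then r ++ [(p.1, PySem.Set.len (p.1.foldl (fun s x => PySem.Set.inter s ((pvIndex ds).getD x PySem.Set.empty))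
        (PySem.Set.ofList (PySem.List.pyRange 0 (ds.length : Int) 1))) * p.2)]
    else r) []

lemma pvB_eq (ds cs : List (List String)) :
    SON_Map2_Task_alt ds cs = PySem.List.sorted (pvRB ds cs) (fun p => p.1) false := by
  unfold SON_Map2_Task_alt pvRB
  rw [PySem.Dict.foldl_insert_getD_add_one_eq_counter]

lemma pvRB_eq_filter (ds cs : List (List String)) :
    pvRB ds cs = ((PySem.Set.ofList cs).filter (fun k => decide (0 < pvMatch ds k))).map
      (fun k => (k, (pvMatch ds k : Int) * (cs.count k : Int))) := by
  unfold pvRB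
  have hstep : (fun (r : List (List String × Int)) (p : List String × Int) =>
      if PySem.Set.len (p.1.foldl (fun s x => PySem.Set.inter s ((pvIndex ds).getD x PySem.Set.empty))
          (PySem.Set.ofList (PySem.List.pyRange 0 (ds.length : Int) 1))) ≠ 0
      then r ++ [(p.1, PySem.Set.len (p.1.foldl (fun s x => PySem.Set.inter s ((pvIndex ds).getD x PySem.Set.empty))
          (PySem.Set.ofList (PySem.List.pyRange 0 (ds.length : Int) 1))) * p.2)]
      else r)
      = fun r p => if 0 < pvMatch ds p.1 then r ++ [(p.1, (pvMatch ds p.1 : Int) * p.2)] else r := by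
    funext r p
    rw [pvCnt ds p.1]
    refine if_congr (by push_cast; omega) rfl rfl
  rw [hstep]
  rw [pvFoldlAppendIf (fun p : List String × Int => 0 < pvMatch ds p.1)
      (fun p : List String × Int => (p.1, (pvMatch ds p.1 : Int) * p.2))]
  rw [PySem.Dict.items_counter, List.filter_map, List.map_map]
  rfl

-- ---- assembling the equivalence ----

lemma pvItemsA_nodup (ds cs : List (List String)) : (pvDictA ds cs).items.Nodup := by
  have h : ((pvDictA ds cs).items.map Prod.fst).Nodup := by
    have := pvDictA_nodup ds cs
    simpa [PySem.Dict.keys] using this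
  exact h.of_map _

lemma pvRB_fst_nodup (ds cs : List (List String)) : ((pvRB ds cs).map Prod.fst).Nodup := by
  rw [pvRB_eq_filter, List.map_map]
  have h : (Prod.fst ∘ fun k => ((k, (pvMatch ds k : Int) * (cs.count k : Int)) : List String × Int)) = id := rfl
  rw [h, List.map_id]
  exact (PySem.Set.nodup_ofList cs).filter _

lemma pvRB_mem (ds cs : List (List String)) (p : List String × Int) :
    p ∈ pvRB ds cs ↔
      (p.1 ∈ cs ∧ 0 < pvMatch ds p.1 ∧ p.2 = (pvMatch ds p.1 : Int) * (cs.count p.1 : Int)) := by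
  obtain ⟨c, v⟩ := p
  rw [pvRB_eq_filter]
  simp only [List.mem_map, List.mem_filter, PySem.Set.mem_ofList, Prod.mk.injEq,
    decide_eq_true_eq]
  constructor
  · rintro ⟨k, ⟨hk, hpos⟩, rfl, rfl⟩; exact ⟨hk, hpos, rfl⟩
  · rintro ⟨hk, hpos, rfl⟩; exact ⟨c, ⟨hk, hpos⟩, rfl, rfl⟩

lemma pvPerm (ds cs : List (List String)) : (pvDictA ds cs).items.Perm (pvRB ds cs) := by
  rw [List.perm_ext_iff_of_nodup (pvItemsA_nodup ds cs) ((pvRB_fst_nodup ds cs).of_map _)]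
  intro p
  rw [pvA_mem, pvRB_mem]
  constructor
  · rintro ⟨h1, h2, h3⟩; exact ⟨h1, h2, by rw [h3]; ring⟩
  · rintro ⟨h1, h2, h3⟩; exact ⟨h1, h2, by rw [h3]; ring⟩

-- ===== VERDICT (by name: the statement is the Claim_ definition above) =====
theorem SON_Map2_Task_spec : Claim_equal_SON_Map2_Task := by
  intro ds cs _
  unfold Spec_SON_Map2_Task
  rw [pvA_eq, pvB_eq]
  unfold pvFormatDict2List
  rw [PySem.Set.ofList_eq_self_of_nodup _ (pvItemsA_nodup ds cs)]
  have hinst : (fun (a b : List String) => a.decidableLT b) = (LinearOrder.toDecidableLT : DecidableLT (List String)) := by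
    funext a b; exact Subsingleton.elim _ _
  have hSortEq : ∀ xs : List (List String × Int),
      @PySem.List.sorted (List String × Int) (List String) List.instLT (fun a b => a.decidableLT b) xs (fun p => p.1) false
      = @PySem.List.sorted (List String × Int) (List String) List.instLinearOrder.toLT LinearOrder.toDecidableLT xs (fun p => p.1) false := by
    intro xs; rw [hinst]
  rw [hSortEq, hSortEq]
  have hperm : (PySem.List.sorted (pvRB ds cs) (fun p => p.1) false).Perm (pvDictA ds cs).items :=
    (PySem.List.sorted_perm (pvRB ds cs) (fun p => p.1) false).trans (pvPerm ds cs).symm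
  have hfst : ((PySem.List.sorted (pvRB ds cs) (fun p => p.1) false).map Prod.fst).Nodup :=
    (List.Perm.map Prod.fst (PySem.List.sorted_perm (pvRB ds cs) (fun p => p.1) false)).nodup_iff.mpr
      (pvRB_fst_nodup ds cs)
  rw [hSortEq] at hperm hfst
  have hlt : (@PySem.List.sorted (List String × Int) (List String) List.instLinearOrder.toLT
      LinearOrder.toDecidableLT (pvRB ds cs) (fun p => p.1) false).Pairwise (fun a b => a.1 < b.1) := by
    have hle := PySem.List.sorted_pairwise (pvRB ds cs) (fun p => p.1)
    have hne := List.pairwise_map.mp hfst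
    exact (hle.and hne).imp (fun h => lt_of_le_of_ne h.1 h.2)
  exact PySem.List.sorted_eq_of_perm_of_pairwise_lt _ _ _ hperm hlt
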